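-- pv_equiv track=rewrite | github.com/Robert076/UBB-Computer-Science | Semester 1/FP/Labs/A6/src/functions.py | getApartmentForPrint
-- ===== SOURCE A (Python) =====
-- def getApartmentForPrint(userInput):
--     apartment = ""
--     i = 5
--     while i < len(userInput) and userInput[i] != " ":
--         apartment += userInput[i]
--         i += 1
--         if i == len(userInput):
--             break
--     return apartment
-- ===== SOURCE B (Python) =====
-- def getApartmentForPrint(userInput):
--     rest = userInput[5:]
--     idx = rest.find(" ")
--     return rest if idx == -1 else rest[:idx]
-- ===== Notes on version B (the rewrite author's own statement) =====
-- stated objective: faster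
-- what changed: Replaces the index-driven while loop that appends characters one at a time with a slice of the suffix plus a single str.find to locate the delimiter and one final slice.
import Mathlib
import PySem

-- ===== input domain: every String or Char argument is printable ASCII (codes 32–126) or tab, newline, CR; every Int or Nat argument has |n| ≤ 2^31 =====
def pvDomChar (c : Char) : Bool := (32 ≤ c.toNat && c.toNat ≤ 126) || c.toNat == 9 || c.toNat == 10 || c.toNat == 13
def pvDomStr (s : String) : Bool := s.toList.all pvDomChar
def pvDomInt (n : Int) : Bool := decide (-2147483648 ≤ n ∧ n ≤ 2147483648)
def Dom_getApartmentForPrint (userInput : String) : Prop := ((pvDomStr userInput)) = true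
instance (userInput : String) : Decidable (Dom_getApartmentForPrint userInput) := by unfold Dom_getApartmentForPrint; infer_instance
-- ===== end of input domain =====

-- B replaces A's character-by-character while loop with slice + find + slice (idiomatic decomposition).

-- ===== PORT A =====
-- the while loop: i runs from 5; stops at len or at a space; the inner 'if i == len: break' is the same bound check
def pvLoopA (s : List Char) (i : Nat) (acc : List Char) : List Char :=
  if h : i < s.length then
    if s[i] ≠ ' ' then
      pvLoopA s (i + 1) (acc ++ [s[i]])
    else acc
  else acc
termination_by s.length - i

def getApartmentForPrint (userInput : String) : String :=
  String.ofList (pvLoopA userInput.toList 5 [])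

-- ===== PORT B =====
def getApartmentForPrint_alt (userInput : String) : String :=
  let rest := PySem.List.slice userInput.toList (some (5 : Int)) none
  let idx := PySem.Chars.find rest [' ']
  if idx = -1 then String.ofList rest
  else String.ofList (PySem.List.slice rest none (some idx))

-- ===== PRECONDITION & SPEC =====
def Spec_getApartmentForPrint (userInput : String) (out : String) : Prop := out = getApartmentForPrint_alt userInput
instance (userInput : String) (out : String) : Decidable (Spec_getApartmentForPrint userInput out) := by unfold Spec_getApartmentForPrint; infer_instance

-- ===== CLAIM (what is proved, stated in full; the proofs are below) =====
def Claim_equal_getApartmentForPrint : Prop := ∀ (userInput : String), Dom_getApartmentForPrint userInput → Spec_getApartmentForPrint userInput (getApartmentForPrint userInput)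

-- ===== LEMMAS AND PROOFS =====

-- A's loop accumulates exactly the longest space-free prefix of the remaining suffix
theorem pvLoopA_eq (s : List Char) (i : Nat) (acc : List Char) :
    pvLoopA s i acc = acc ++ (s.drop i).takeWhile (· ≠ ' ') := by
  fun_induction pvLoopA s i acc with
  | case1 i acc h hc ih =>
    rw [ih, List.drop_eq_getElem_cons h, List.takeWhile_cons]
    simp [hc]
  | case2 i acc h hc =>
    rw [List.drop_eq_getElem_cons h, List.takeWhile_cons]
    simp only [not_not] at hc
    simp [hc]
  | case3 i acc h =>
    have hnil : s.drop i = [] := List.drop_eq_nil_of_le (by omega)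
    simp [hnil]

-- a singleton list is a prefix of l exactly when l starts with that character
theorem singleton_prefix_iff (c : Char) (l : List Char) :
    [c] <+: l ↔ ∃ t, l = c :: t := by
  constructor
  · rintro ⟨t, rfl⟩; exact ⟨t, rfl⟩
  · rintro ⟨t, rfl⟩; exact ⟨t, rfl⟩

-- takeWhile stops exactly at the first index where the predicate fails
theorem takeWhile_eq_take_of (p : Char → Bool) (l : List Char) (j : Nat) (hj : j < l.length)
    (hlt : ∀ k (hk : k < j), p (l[k]'(by omega)) = true) (hfail : p (l[j]) = false) :
    l.takeWhile p = l.take j := by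
  induction l generalizing j with
  | nil => simp at hj
  | cons a t ih =>
    cases j with
    | zero => simp_all
    | succ j =>
      have ha : p a = true := hlt 0 (by omega)
      simp only [List.takeWhile_cons, ha, if_pos, List.take_succ_cons]
      rw [ih j (by simpa using hj) (fun k hk => hlt (k + 1) (by omega)) (by simpa using hfail)]

theorem getApartmentForPrint_spec : Claim_equal_getApartmentForPrint := by
  intro userInput _
  unfold Spec_getApartmentForPrint getApartmentForPrint getApartmentForPrint_alt
  have hslice : PySem.List.slice userInput.toList (some (5 : Int)) none
      = userInput.toList.drop 5 := by
    rw [PySem.List.slice_from _ (by norm_num)]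
    simp
  rw [hslice, pvLoopA_eq]
  set rest := userInput.toList.drop 5 with hrest
  simp only [List.nil_append]
  by_cases hf : PySem.Chars.find rest [' '] = -1
  · -- no space in the suffix: takeWhile keeps everything
    rw [if_pos hf]
    congr 1
    apply List.takeWhile_eq_self_iff.mpr
    intro a ha
    simp only [ne_eq, decide_not, Bool.not_eq_true', decide_eq_false_iff_not]
    rintro rfl
    have hni : ¬ [' '] <:+: rest := (PySem.Chars.find_eq_neg_one_iff _ _).mp hf
    obtain ⟨pre, post, heq⟩ := List.append_of_mem ha
    exact hni ⟨pre, post, by rw [heq]; simp⟩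
  · -- a space at index j = find: takeWhile is take j
    rw [if_neg hf]
    have h0 : 0 ≤ PySem.Chars.find rest [' '] := by
      have := PySem.Chars.neg_one_le_find rest [' ']
      omega
    obtain ⟨hpre, hmin⟩ := PySem.Chars.find_spec (s := rest) (sub := [' ']) h0
    set j := (PySem.Chars.find rest [' ']).toNat with hj
    obtain ⟨t, ht⟩ := (singleton_prefix_iff _ _).mp hpre
    have hjlt : j < rest.length := by
      have := congrArg List.length ht
      simp [List.length_drop] at this
      omega
    have hatj : rest[j] = ' ' := by
      have hcons := List.drop_eq_getElem_cons (l := rest) (i := j) hjlt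
      rw [ht] at hcons
      exact (List.cons.injEq _ _ _ _ ▸ hcons :
        ' ' = rest[j] ∧ _).1.symm
    have hbefore : ∀ k (hk : k < j), rest[k]'(by omega) ≠ ' ' := by
      intro k hk hcontra
      apply hmin k hk
      rw [singleton_prefix_iff]
      exact ⟨rest.drop (k + 1), by rw [List.drop_eq_getElem_cons (by omega), hcontra]⟩
    rw [PySem.List.slice_to]
    congr 1
    apply takeWhile_eq_take_of _ _ j hjlt
    · intro k hk; simp [hbefore k hk]
    · simp [hatj]
    exact h0
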